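-- pv_equiv track=rewrite | github.com/daniel-reich/ubiquitous-fiesta | 9Px2rkc9TPhK54wDb_9.py | ecg_seq_index
-- ===== SOURCE A (Python) =====
-- def ecg_seq_index(n):
--   def gcd(a,b):
--     while a>0:
--       a,b = b%a,a
--     return b
--
--   lst = [1,2]
--   while True:
--     new = 2
--     while new in lst or gcd(new,lst[-1])==1:
--       new+=1
--     lst+=[new]
--     if new == n:
--       return len(lst)-1
-- ===== SOURCE B (Python) =====
-- def ecg_seq_index(n):
--     # Divisor-indexed search: the next EKG term is the minimum, over divisors d >= 2
--     # of the previous term, of the smallest unused multiple of d (O(1) set membership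
--     # instead of rescanning candidates with a linear 'in list' test).
--     used = {1, 2}
--     prev = 2
--     idx = 1
--     while True:
--         best = None
--         for d in range(2, prev + 1):
--             if prev % d == 0:
--                 m = 1
--                 while d * m in used:
--                     m += 1
--                 c = d * m
--                 if best is None or c < best:
--                     best = c
--         used.add(best)
--         prev = best
--         idx += 1
--         if best == n:
--             return idx
-- ===== Notes on version B (the rewrite author's own statement) =====
-- stated objective: faster
-- what changed: Instead of rescanning candidates 2,3,4,... with a linear 'new in lst' list test for each, B keeps a hash set of used values and computes the next EKG term as the minimum, over divisors d >= 2 of the previous term, of the smallest unused multiple of d.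
import Mathlib
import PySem

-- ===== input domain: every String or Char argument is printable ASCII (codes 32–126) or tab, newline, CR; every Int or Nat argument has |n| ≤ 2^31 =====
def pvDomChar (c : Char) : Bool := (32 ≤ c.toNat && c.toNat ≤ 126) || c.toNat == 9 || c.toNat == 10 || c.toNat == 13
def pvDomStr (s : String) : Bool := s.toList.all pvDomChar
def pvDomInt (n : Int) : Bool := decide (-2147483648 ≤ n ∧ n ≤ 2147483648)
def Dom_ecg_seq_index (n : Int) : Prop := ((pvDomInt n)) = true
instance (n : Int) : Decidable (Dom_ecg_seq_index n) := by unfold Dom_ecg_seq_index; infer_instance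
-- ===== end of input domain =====

-- B replaces A's upward rescan of candidates (with a linear 'new in lst' membership test) by a
-- divisor-indexed search: the next term is the minimum, over divisors d ≥ 2 of the previous
-- term, of the smallest unused multiple of d, with a set for O(1) membership.  Objective: faster.

-- shared linear upward scan: first value (counting up from k) where p is false;
-- the fuel argument only makes the Python 'while' loops total (proved sufficient below)
def scanUp (p : Int → Bool) (k : Int) : Nat → Int
  | 0 => k
  | f + 1 => if p k then scanUp p (k + 1) f else k

-- ===== PORT A =====
-- A's inner gcd: while a > 0: a, b = b % a, a; return b
def pygcdA (a b : Int) : Int :=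
  if h : 0 < a then pygcdA (PySem.Int.mod b a) a else b
termination_by a.toNat
decreasing_by
  have h1 : 0 ≤ PySem.Int.mod b a := PySem.Int.mod_nonneg b h
  have h2 : PySem.Int.mod b a < a := PySem.Int.mod_lt b h
  omega

-- fuel bound for A's inner 'while new in lst or gcd(new, lst[-1]) == 1: new += 1'
def fuelA (lst : List Int) (prev : Int) : Nat := (prev * (lst.foldl max 0 + 1)).toNat

def loopA (n : Int) (lst : List Int) : Nat → Int
  | 0 => 0
  | f + 1 =>
    let prev := (PySem.List.pyGet? lst (-1)).getD 0
    let new := scanUp (fun new => lst.contains new || pygcdA new prev == 1) 2 (fuelA lst prev)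
    let lst' := lst ++ [new]
    if new = n then ((lst'.length : Int) - 1) else loopA n lst' f

def ecg_seq_index (n : Int) : Int := loopA n [1, 2] 4294967296

-- ===== PORT B =====
-- fuel bound for B's inner 'while d * m in used: m += 1'
def fuelB (used : PySem.Set Int) : Nat := (used.foldl max 0 + 1).toNat

-- B's 'for d in range(2, prev + 1)' loop computing the running minimum candidate
def bestB (used : PySem.Set Int) (prev : Int) : Option Int :=
  (PySem.List.pyRange 2 (prev + 1) 1).foldl
    (fun best d =>
      if PySem.Int.mod prev d = 0 then
        let c := d * scanUp (fun m => PySem.Set.contains used (d * m)) 1 (fuelB used)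
        match best with
        | none => some c
        | some b => if c < b then some c else some b
      else best) none

def loopB (n : Int) (used : PySem.Set Int) (prev idx : Int) : Nat → Int
  | 0 => 0
  | f + 1 =>
    let best := (bestB used prev).getD 0
    let used' := PySem.Set.add used best
    if best = n then idx + 1 else loopB n used' best (idx + 1) f

def ecg_seq_index_alt (n : Int) : Int := loopB n (PySem.Set.ofList [1, 2]) 2 1 4294967296

-- ===== PRECONDITION & SPEC =====
def Spec_ecg_seq_index (n : Int) (out : Int) : Prop := out = ecg_seq_index_alt n
instance (n : Int) (out : Int) : Decidable (Spec_ecg_seq_index n out) := by unfold Spec_ecg_seq_index; infer_instance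

-- ===== CLAIM (what is proved, stated in full; the proofs are below) =====
def Claim_equal_ecg_seq_index : Prop := ∀ (n : Int), Dom_ecg_seq_index n → Spec_ecg_seq_index n (ecg_seq_index n)

-- ===== LEMMAS AND PROOFS =====

theorem gcd_emod_left (a b : Int) : Int.gcd (b % a) a = Int.gcd a b := by
  have : b % a = b - a * (b / a) := by rw [Int.emod_def]
  rw [this, Int.gcd_comm a b]
  simpa [mul_comm, sub_eq_add_neg, mul_assoc] using (Int.gcd_add_mul_right_left a b (-(b / a))).symm

theorem pygcdA_eq_gcd (a b : Int) (ha : 0 ≤ a) (hb : 0 ≤ b) :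
    pygcdA a b = (Int.gcd a b : Int) := by
  have H : ∀ (k : Nat) (a b : Int), a.toNat ≤ k → 0 ≤ a → 0 ≤ b → pygcdA a b = (Int.gcd a b : Int) := by
    intro k
    induction k with
    | zero =>
      intro a b hk ha hb
      have : a = 0 := by omega
      subst this
      rw [pygcdA]
      simp [Int.gcd, Int.natAbs_of_nonneg hb]
    | succ k ih =>
      intro a b hk ha hb
      rw [pygcdA]
      by_cases h : 0 < a
      · simp only [h, dite_true]
        have hm : PySem.Int.mod b a = b % a := PySem.Int.mod_eq_emod_of_pos h
        have h1 : 0 ≤ b % a := Int.emod_nonneg b (by omega)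
        have h2 : b % a < a := Int.emod_lt_of_pos b h
        rw [hm, ih (b % a) a (by omega) h1 ha, gcd_emod_left]
      · have : a = 0 := by omega
        subst this
        simp [Int.gcd, Int.natAbs_of_nonneg hb]
  exact H a.toNat a b le_rfl ha hb

theorem scanUp_spec (p : Int → Bool) :
    ∀ (f : Nat) (k : Int), (∃ j : Nat, j < f ∧ p (k + (j : Int)) = false) →
      p (scanUp p k f) = false ∧ k ≤ scanUp p k f ∧
        ∀ x, k ≤ x → x < scanUp p k f → p x = true := by
  intro f
  induction f with
  | zero => intro k ⟨j, hj, _⟩; exact (Nat.not_lt_zero j hj).elim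
  | succ f ih =>
    intro k ⟨j, hj, hpj⟩
    by_cases hk : p k = true
    · have hj0 : j ≠ 0 := by rintro rfl; simp at hpj; rw [hpj] at hk; simp at hk
      have hex : ∃ j' : Nat, j' < f ∧ p (k + 1 + (j' : Int)) = false := by
        refine ⟨j - 1, by omega, ?_⟩
        have : k + 1 + ((j - 1 : Nat) : Int) = k + (j : Int) := by push_cast; omega
        rw [this]; exact hpj
      obtain ⟨h1, h2, h3⟩ := ih (k + 1) hex
      refine ⟨?_, ?_, ?_⟩
      · simpa [scanUp, hk] using h1
      · simp only [scanUp, hk, if_true]; omega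
      · intro x hx1 hx2
        simp only [scanUp, hk, if_true] at hx2
        rcases eq_or_lt_of_le hx1 with h | h
        · rw [← h]; exact hk
        · exact h3 x (by omega) hx2
    · simp only [Bool.not_eq_true] at hk
      refine ⟨by simpa [scanUp, hk], by simp [scanUp, hk], ?_⟩
      intro x hx1 hx2
      simp only [scanUp, hk] at hx2
      exact absurd (hx1.trans_lt hx2) (lt_irrefl k)

-- A's scan finds the least k ≥ 2 outside lst with gcd(k, prev) ≠ 1
theorem nextA_char (lst : List Int) (prev : Int) (hprev : 2 ≤ prev) :
    2 ≤ scanUp (fun new => lst.contains new || pygcdA new prev == 1) 2 (fuelA lst prev) ∧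
    scanUp (fun new => lst.contains new || pygcdA new prev == 1) 2 (fuelA lst prev) ∉ lst ∧
    Int.gcd (scanUp (fun new => lst.contains new || pygcdA new prev == 1) 2 (fuelA lst prev)) prev ≠ 1 ∧
    ∀ x, 2 ≤ x → x < scanUp (fun new => lst.contains new || pygcdA new prev == 1) 2 (fuelA lst prev) →
      (x ∈ lst ∨ Int.gcd x prev = 1) := by
  set p := fun new => lst.contains new || pygcdA new prev == 1 with hp
  obtain ⟨hM0, hMall⟩ := PySem.List.le_foldl_max lst (0 : Int)
  set M := lst.foldl max (0 : Int) with hM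
  set k0 := prev * (M + 1) with hk0
  have hM0' : (0 : Int) ≤ M := hM0
  have hk0ge : 2 * (M + 1) ≤ k0 := by
    apply mul_le_mul_of_nonneg_right hprev; omega
  have hk02 : 2 ≤ k0 := by omega
  have hpk0 : p k0 = false := by
    have hnm : k0 ∉ lst := fun h => by have := hMall k0 h; omega
    have hg : pygcdA k0 prev = (Int.gcd k0 prev : Int) :=
      pygcdA_eq_gcd k0 prev (by omega) (by omega)
    have hgne : Int.gcd k0 prev ≠ 1 := by
      intro h1
      have hd1 : prev ∣ k0 := ⟨M + 1, rfl⟩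
      have hdvd : prev ∣ (Int.gcd k0 prev : Int) := Int.dvd_coe_gcd hd1 dvd_rfl
      rw [h1] at hdvd
      have := Int.le_of_dvd (by norm_num) hdvd
      omega
    simp [hp, hnm, hg]
    intro h; exact absurd (by exact_mod_cast h) hgne
  have hex : ∃ j : Nat, j < fuelA lst prev ∧ p (2 + (j : Int)) = false := by
    have hfA : fuelA lst prev = k0.toNat := rfl
    refine ⟨(k0 - 2).toNat, by rw [hfA]; omega, ?_⟩
    have : (2 : Int) + ((k0 - 2).toNat : Int) = k0 := by omega
    rw [this]; exact hpk0
  obtain ⟨h1, h2, h3⟩ := scanUp_spec p (fuelA lst prev) 2 hex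
  set r := scanUp p 2 (fuelA lst prev) with hr
  refine ⟨h2, ?_, ?_, ?_⟩
  · intro hmem
    simp [hp, hmem] at h1
  · intro hgeq
    have hg : pygcdA r prev = (Int.gcd r prev : Int) :=
      pygcdA_eq_gcd r prev (by omega) (by omega)
    simp [hp, hg, hgeq] at h1
  · intro x hx1 hx2
    have := h3 x hx1 hx2
    simp only [hp, Bool.or_eq_true, List.contains_iff_mem, beq_iff_eq] at this
    rcases this with h | h
    · exact Or.inl h
    · right
      have hg : pygcdA x prev = (Int.gcd x prev : Int) :=
        pygcdA_eq_gcd x prev (by omega) (by omega)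
      rw [hg] at h
      exact_mod_cast h

-- B's multiple scan finds the least m ≥ 1 with d * m unused
theorem multB_char (used : PySem.Set Int) (d : Int) (hd : 2 ≤ d) :
    1 ≤ scanUp (fun m => PySem.Set.contains used (d * m)) 1 (fuelB used) ∧
    d * scanUp (fun m => PySem.Set.contains used (d * m)) 1 (fuelB used) ∉ used ∧
    ∀ t, 1 ≤ t → t < scanUp (fun m => PySem.Set.contains used (d * m)) 1 (fuelB used) →
      d * t ∈ used := by
  set p := fun m => PySem.Set.contains used (d * m) with hp
  obtain ⟨hM0, hMall⟩ := PySem.List.le_foldl_max used (0 : Int)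
  set M := List.foldl max (0 : Int) used with hM
  have hex : ∃ j : Nat, j < fuelB used ∧ p (1 + (j : Int)) = false := by
    refine ⟨M.toNat, by unfold fuelB; omega, ?_⟩
    have h1 : (1 : Int) + (M.toNat : Int) = M + 1 := by omega
    rw [h1]
    have hnm : d * (M + 1) ∉ used := by
      intro h
      have h2 := hMall _ h
      have : 2 * (M + 1) ≤ d * (M + 1) := by apply mul_le_mul_of_nonneg_right hd; omega
      omega
    show PySem.Set.contains used (d * (M + 1)) = false
    rw [← Bool.not_eq_true, PySem.Set.contains_iff]
    exact hnm
  obtain ⟨h1, h2, h3⟩ := scanUp_spec p (fuelB used) 1 hex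
  refine ⟨h2, ?_, ?_⟩
  · intro hmem
    rw [hp] at h1; simp only at h1
    rw [← PySem.Set.contains_iff used] at hmem
    rw [h1] at hmem; exact Bool.false_ne_true hmem
  · intro t ht1 ht2
    have := h3 t ht1 ht2
    rw [hp] at this; simp only at this
    exact (PySem.Set.contains_iff used (d * t)).mp this

-- proof-side names for B's candidate per divisor and the fold step of bestB
def candB (used : PySem.Set Int) (d : Int) : Int :=
  d * scanUp (fun m => PySem.Set.contains used (d * m)) 1 (fuelB used)

def stepB (used : PySem.Set Int) (prev : Int) (best : Option Int) (d : Int) : Option Int :=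
  if PySem.Int.mod prev d = 0 then
    match best with
    | none => some (candB used d)
    | some b => if candB used d < b then some (candB used d) else some b
  else best

theorem bestB_eq (used : PySem.Set Int) (prev : Int) :
    bestB used prev = (PySem.List.pyRange 2 (prev + 1) 1).foldl (stepB used prev) none := rfl

theorem foldB_min (used : PySem.Set Int) (prev : Int) :
    ∀ (l : List Int) (init : Option Int),
      (l.foldl (stepB used prev) init = none → init = none ∧ ∀ d ∈ l, PySem.Int.mod prev d ≠ 0) ∧
      (∀ v, l.foldl (stepB used prev) init = some v →
        ((init = some v ∨ ∃ d ∈ l, PySem.Int.mod prev d = 0 ∧ v = candB used d) ∧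
         (∀ w, init = some w → v ≤ w) ∧
         (∀ d ∈ l, PySem.Int.mod prev d = 0 → v ≤ candB used d))) := by
  intro l
  induction l with
  | nil =>
    intro init
    constructor
    · intro h; exact ⟨h, by simp⟩
    · intro v h
      simp only [List.foldl_nil] at h
      exact ⟨Or.inl h, fun w hw => by rw [h] at hw; injection hw with hw; omega, by simp⟩
  | cons d l ih =>
    intro init
    obtain ⟨ihn, ihs⟩ := ih (stepB used prev init d)
    constructor
    · intro h
      simp only [List.foldl_cons] at h
      obtain ⟨h1, h2⟩ := ihn h
      by_cases hm : PySem.Int.mod prev d = 0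
      · exfalso
        unfold stepB at h1
        rw [if_pos hm] at h1
        cases init <;> simp at h1
        split at h1 <;> simp at h1
      · unfold stepB at h1
        rw [if_neg hm] at h1
        exact ⟨h1, by
          intro e he
          rcases List.mem_cons.mp he with rfl | he'
          · exact hm
          · exact h2 e he'⟩
    · intro v h
      simp only [List.foldl_cons] at h
      obtain ⟨hsrc, hle, hall⟩ := ihs v h
      by_cases hm : PySem.Int.mod prev d = 0
      · have hstep : ∃ u, stepB used prev init d = some u ∧ u ≤ candB used d ∧
            (u = candB used d ∨ init = some u) ∧ (∀ w, init = some w → u ≤ w) := by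
          unfold stepB
          rw [if_pos hm]
          cases init with
          | none => exact ⟨candB used d, rfl, le_rfl, Or.inl rfl, by simp⟩
          | some b =>
            have hred : (match some b with
                | none => some (candB used d)
                | some b => if candB used d < b then some (candB used d) else some b) =
                (if candB used d < b then some (candB used d) else some b) := rfl
            rw [hred]
            by_cases hc : candB used d < b
            · rw [if_pos hc]
              exact ⟨candB used d, rfl, le_rfl, Or.inl rfl, by
                intro w hw; injection hw with hw; omega⟩
            · rw [if_neg hc]
              exact ⟨b, rfl, by omega, Or.inr rfl, by
                intro w hw; injection hw with hw; omega⟩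
        obtain ⟨u, hu, huc, husrc, hule⟩ := hstep
        have hvu : v ≤ u := hle u hu
        refine ⟨?_, ?_, ?_⟩
        · rcases hsrc with h1 | ⟨e, he, hme, hve⟩
          · rw [hu] at h1; injection h1 with h1; subst h1
            rcases husrc with h2 | h2
            · exact Or.inr ⟨d, List.mem_cons_self, hm, h2⟩
            · exact Or.inl h2
          · exact Or.inr ⟨e, List.mem_cons.mpr (Or.inr he), hme, hve⟩
        · intro w hw
          exact le_trans hvu (hule w hw)
        · intro e he hme
          rcases List.mem_cons.mp he with rfl | he'
          · exact le_trans hvu huc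
          · exact hall e he' hme
      · have hstep : stepB used prev init d = init := by unfold stepB; rw [if_neg hm]
        rw [hstep] at hsrc hle
        refine ⟨?_, hle, ?_⟩
        · rcases hsrc with h1 | ⟨e, he, hme, hve⟩
          · exact Or.inl h1
          · exact Or.inr ⟨e, List.mem_cons.mpr (Or.inr he), hme, hve⟩
        · intro e he hme
          rcases List.mem_cons.mp he with rfl | he'
          · exact absurd hme hm
          · exact hall e he' hme

-- B's divisor loop computes exactly the least k ≥ 2 outside used with gcd(k, prev) ≠ 1
theorem bestB_char (used : PySem.Set Int) (prev : Int) (hprev : 2 ≤ prev) :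
    ∃ v, bestB used prev = some v ∧ 2 ≤ v ∧ v ∉ used ∧ Int.gcd v prev ≠ 1 ∧
      ∀ x, 2 ≤ x → x ∉ used → Int.gcd x prev ≠ 1 → v ≤ x := by
  rw [bestB_eq]
  obtain ⟨hn, hs⟩ := foldB_min used prev (PySem.List.pyRange 2 (prev + 1) 1) none
  have hprevmem : prev ∈ PySem.List.pyRange 2 (prev + 1) 1 :=
    PySem.List.mem_pyRange_one.mpr ⟨hprev, by omega⟩
  have hprevdvd : PySem.Int.mod prev prev = 0 := (PySem.Int.mod_eq_zero_iff_dvd prev prev).mpr dvd_rfl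
  obtain ⟨v, hv⟩ : ∃ v, (PySem.List.pyRange 2 (prev + 1) 1).foldl (stepB used prev) none = some v := by
    cases h : (PySem.List.pyRange 2 (prev + 1) 1).foldl (stepB used prev) none with
    | none => exact absurd hprevdvd ((hn h).2 prev hprevmem)
    | some v => exact ⟨v, rfl⟩
  obtain ⟨hsrc, _, hall⟩ := hs v hv
  rcases hsrc with h1 | ⟨d, hd, hmd, hvd⟩
  · exact absurd h1 (by simp)
  have hd2 : 2 ≤ d := (PySem.List.mem_pyRange_one.mp hd).1
  have hddvd : d ∣ prev := (PySem.Int.mod_eq_zero_iff_dvd prev d).mp hmd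
  obtain ⟨hm1, hmnot, hmall⟩ := multB_char used d hd2
  set mstar := scanUp (fun m => PySem.Set.contains used (d * m)) 1 (fuelB used) with hms
  have hvval : v = d * mstar := hvd
  have hv2 : 2 ≤ v := by
    rw [hvval]
    have : 2 * 1 ≤ d * mstar := mul_le_mul hd2 hm1 (by omega) (by omega)
    omega
  have hvnot : v ∉ used := by rw [hvval]; exact hmnot
  have hvgcd : Int.gcd v prev ≠ 1 := by
    intro h1
    have hdv : d ∣ v := ⟨mstar, hvval⟩
    have hdg : d ∣ (Int.gcd v prev : Int) := Int.dvd_coe_gcd hdv hddvd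
    rw [h1] at hdg
    have := Int.le_of_dvd (by norm_num) hdg
    omega
  refine ⟨v, hv, hv2, hvnot, hvgcd, ?_⟩
  intro x hx2 hxnot hxgcd
  set g := (Int.gcd x prev : Int) with hg
  have hgx : g ∣ x := Int.gcd_dvd_left x prev
  have hgp : g ∣ prev := Int.gcd_dvd_right x prev
  have hg0 : 0 ≤ g := by positivity
  have hgne0 : g ≠ 0 := by
    intro h0
    rw [hg] at h0
    have : Int.gcd x prev = 0 := by exact_mod_cast h0
    have := Int.gcd_eq_zero_iff.mp this
    omega
  have hgne1 : g ≠ 1 := by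
    intro h0
    rw [hg] at h0
    exact hxgcd (by exact_mod_cast h0)
  have hg2 : 2 ≤ g := by omega
  have hgle : g ≤ prev := Int.le_of_dvd (by omega) hgp
  have hgmem : g ∈ PySem.List.pyRange 2 (prev + 1) 1 :=
    PySem.List.mem_pyRange_one.mpr ⟨hg2, by omega⟩
  have hgmod : PySem.Int.mod prev g = 0 := (PySem.Int.mod_eq_zero_iff_dvd prev g).mpr hgp
  have hvcg : v ≤ candB used g := hall g hgmem hgmod
  obtain ⟨hgm1, hgmnot, hgmall⟩ := multB_char used g hg2
  set mg := scanUp (fun m => PySem.Set.contains used (g * m)) 1 (fuelB used) with hmg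
  obtain ⟨t, ht⟩ := hgx
  have ht1 : 1 ≤ t := by
    by_contra hcon
    have htle : t ≤ 0 := by omega
    have hx2' : 2 ≤ g * t := by rw [← ht]; exact hx2
    have h2 : g * t ≤ 0 := mul_nonpos_of_nonneg_of_nonpos (by omega) htle
    omega
  have hmt : mg ≤ t := by
    by_contra hlt
    have hlt2 : t < mg := by omega
    have := hgmall t ht1 hlt2
    rw [← ht] at this
    exact hxnot this
  have : candB used g ≤ x := by
    show g * mg ≤ x
    rw [ht]
    exact mul_le_mul_of_nonneg_left hmt (by omega)
  omega

-- the two outer loops agree in lockstep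
theorem loop_eq : ∀ (f : Nat) (n : Int) (lst : List Int) (used : PySem.Set Int) (prev idx : Int),
    (PySem.List.pyGet? lst (-1)).getD 0 = prev →
    (∀ x, x ∈ used ↔ x ∈ lst) → 2 ≤ prev →
    idx = (lst.length : Int) - 1 →
    loopA n lst f = loopB n used prev idx f := by
  intro f
  induction f with
  | zero => intros; rfl
  | succ f ih =>
    intro n lst used prev idx hlast hmem hprev hidx
    rw [loopA, loopB]
    simp only [hlast]
    obtain ⟨ha2, hanot, hagcd, hamin⟩ := nextA_char lst prev hprev
    obtain ⟨v, hv, hv2, hvnot, hvgcd, hvmin⟩ := bestB_char used prev hprev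
    set r := scanUp (fun new => lst.contains new || pygcdA new prev == 1) 2 (fuelA lst prev) with hr
    have hveq : v = r := by
      have h1 : v ∉ lst := fun h => hvnot ((hmem v).mpr h)
      have h2 : r ≤ v := by
        by_contra hc
        have := hamin v hv2 (by omega)
        rcases this with h | h
        · exact h1 h
        · exact hvgcd h
      have h3 : v ≤ r := hvmin r ha2 (fun h => hanot ((hmem r).mp h)) hagcd
      omega
    rw [hv]
    simp only [Option.getD_some, hveq]
    by_cases heq : r = n
    · rw [if_pos heq, if_pos heq]
      simp only [List.length_append, List.length_cons, List.length_nil]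
      push_cast
      omega
    · rw [if_neg heq, if_neg heq]
      apply ih
      · rw [PySem.List.pyGet?_neg_one_append_singleton]; rfl
      · intro x
        rw [PySem.Set.mem_add, List.mem_append, List.mem_singleton, hmem x]
      · omega
      · simp only [List.length_append, List.length_cons, List.length_nil]
        push_cast
        omega

-- ===== VERDICT (by name: the statement is the Claim_ definition above) =====
theorem ecg_seq_index_spec : Claim_equal_ecg_seq_index := by
  intro n _
  unfold Spec_ecg_seq_index ecg_seq_index ecg_seq_index_alt
  apply loop_eq
  · rfl
  · intro x; rw [PySem.Set.mem_ofList]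
  · norm_num
  · rfl
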